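-- pv_equiv track=rewrite | github.com/lbodens/Fitting_at_HZB | Param_updater.py | param_per_spectra_sorting_fkt
-- ===== SOURCE A (Python) =====
-- def param_per_spectra_sorting_fkt(p4fit,  number_of_spectra, number_of_peaks):
--     p4fit_di={}
--     for i in range(int(number_of_spectra)):
--         p4fit_di[f"spectra_{i}"] = {}
--     for idx in range(int(number_of_peaks)):
--         for i in range(int(number_of_spectra)):
--             for name in p4fit:
--                 if f'p{i}_{idx}_' in name:
--                     p4fit_di[f'spectra_{i}'][f"{name}"]= p4fit[name]
--     return p4fit_di
-- ===== SOURCE B (Python) =====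
-- # Group fit parameters by the literal 'p<i>_<idx>_' tag each name carries, then read the
-- # buckets off in output order -- one parsing pass over the names instead of testing every
-- # (spectrum, peak) pattern against every name.
--
-- def param_per_spectra_sorting_fkt(p4fit, number_of_spectra, number_of_peaks):
--     spectra = int(number_of_spectra)
--     peaks = int(number_of_peaks)
--     occurrences = {}  # tag 'p<seg>_<seg>_' -> [(name, value), ...] in input order
--     for name, value in p4fit.items():
--         tags = set()
--         for j, c in enumerate(name):
--             if c == 'p':
--                 parts = name[j + 1:].split('_', 2)
--                 if len(parts) == 3:
--                     tags.add(f"p{parts[0]}_{parts[1]}_")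
--         for tag in tags:
--             occurrences.setdefault(tag, []).append((name, value))
--     result = {}
--     for i in range(spectra):
--         merged = {}
--         for idx in range(peaks):
--             for name, value in occurrences.get(f"p{i}_{idx}_", []):
--                 merged[name] = value
--         result[f"spectra_{i}"] = merged
--     return result
-- ===== Notes on version B (the rewrite author's own statement) =====
-- stated objective: faster
-- what changed: Instead of testing every pattern f'p{i}_{idx}_' against every name (peaks x spectra x names substring tests), B makes one pass over the names, collects the set of literal 'p<seg>_<seg>_' tags each name contains (split('_', 2) after each 'p'), buckets the (name, value) pairs by tag, and then just reads the buckets off in output order.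
import Mathlib
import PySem

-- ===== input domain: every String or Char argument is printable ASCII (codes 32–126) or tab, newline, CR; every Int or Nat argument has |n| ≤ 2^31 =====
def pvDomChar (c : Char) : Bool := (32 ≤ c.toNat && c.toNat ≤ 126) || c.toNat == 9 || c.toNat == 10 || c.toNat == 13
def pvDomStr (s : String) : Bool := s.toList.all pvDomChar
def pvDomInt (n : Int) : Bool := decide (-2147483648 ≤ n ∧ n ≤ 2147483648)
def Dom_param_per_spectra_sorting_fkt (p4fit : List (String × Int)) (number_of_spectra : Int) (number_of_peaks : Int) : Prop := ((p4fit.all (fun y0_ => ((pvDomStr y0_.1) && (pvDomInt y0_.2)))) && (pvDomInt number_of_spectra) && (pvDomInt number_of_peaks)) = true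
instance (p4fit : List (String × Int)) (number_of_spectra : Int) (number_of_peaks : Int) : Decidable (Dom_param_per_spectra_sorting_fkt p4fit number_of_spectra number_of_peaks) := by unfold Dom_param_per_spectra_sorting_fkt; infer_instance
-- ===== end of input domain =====

-- ===== PORT A =====
-- Port of A: triple loop (peak idx × spectrum i × names) testing 'p{i}_{idx}_' in name,
-- inserting into the per-spectrum inner dict (Python's nested dict item assignment = Dict.modify;
-- the outer key f'spectra_{i}' always exists, since i comes from range(number_of_spectra)).
def param_per_spectra_sorting_fkt (p4fit : List (String × Int)) (number_of_spectra : Int) (number_of_peaks : Int) : List (String × List (String × Int)) :=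
  let di0 : PySem.Dict String (PySem.Dict String Int) :=
    (PySem.List.pyRange 0 number_of_spectra 1).foldl
      (fun d i => d.insert ("spectra_" ++ PySem.Int.toStr i) PySem.Dict.empty) PySem.Dict.empty
  let di :=
    (PySem.List.pyRange 0 number_of_peaks 1).foldl (fun d idx =>
      (PySem.List.pyRange 0 number_of_spectra 1).foldl (fun d i =>
        p4fit.foldl (fun d nv =>
          if PySem.Str.isIn ("p" ++ PySem.Int.toStr i ++ "_" ++ PySem.Int.toStr idx ++ "_") nv.1 then
            d.modify ("spectra_" ++ PySem.Int.toStr i) PySem.Dict.empty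
              (fun inner => inner.insert nv.1 nv.2)
          else d) d) d) di0
  di.items.map (fun p => (p.1, p.2.items))

-- ===== PORT B =====
-- Port of B (Source B): one pass over the names collecting the set of literal 'p<seg>_<seg>_'
-- tags each name contains (split('_', 2) after each 'p'), bucketing the (name, value)
-- pairs per tag, then reading the buckets off in output order.

-- Source B's per-name tag collection ('tags' set in the loop body)
def pvTags (cs : List Char) : PySem.Set String :=
  (PySem.List.enumerate cs).foldl (fun t jc =>
    if jc.2 = 'p' then
      match PySem.Chars.splitOnMax (PySem.List.slice cs (some (jc.1 + 1)) none) ['_'] 2 with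
      | [a, b, _] => t.add ("p" ++ String.ofList a ++ "_" ++ String.ofList b ++ "_")
      | _ => t
    else t) PySem.Set.empty

def param_per_spectra_sorting_fkt_alt (p4fit : List (String × Int)) (number_of_spectra : Int) (number_of_peaks : Int) : List (String × List (String × Int)) :=
  let occ : PySem.Dict String (List (String × Int)) :=
    p4fit.foldl (fun occ nv =>
      (pvTags nv.1.toList).foldl
        (fun occ tag => occ.modify tag [] (fun l => l ++ [(nv.1, nv.2)])) occ) PySem.Dict.empty
  let result : PySem.Dict String (PySem.Dict String Int) :=
    (PySem.List.pyRange 0 number_of_spectra 1).foldl (fun res i =>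
      let merged : PySem.Dict String Int :=
        (PySem.List.pyRange 0 number_of_peaks 1).foldl (fun m idx =>
          (occ.getD ("p" ++ PySem.Int.toStr i ++ "_" ++ PySem.Int.toStr idx ++ "_") []).foldl
            (fun m nv => m.insert nv.1 nv.2) m) PySem.Dict.empty
      res.insert ("spectra_" ++ PySem.Int.toStr i) merged) PySem.Dict.empty
  result.items.map (fun p => (p.1, p.2.items))

-- ===== PRECONDITION & SPEC =====
def Spec_param_per_spectra_sorting_fkt (p4fit : List (String × Int)) (number_of_spectra : Int) (number_of_peaks : Int) (out : List (String × List (String × Int))) : Prop := out = param_per_spectra_sorting_fkt_alt p4fit number_of_spectra number_of_peaks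
instance (p4fit : List (String × Int)) (number_of_spectra : Int) (number_of_peaks : Int) (out : List (String × List (String × Int))) : Decidable (Spec_param_per_spectra_sorting_fkt p4fit number_of_spectra number_of_peaks out) := by unfold Spec_param_per_spectra_sorting_fkt; infer_instance

-- ===== CLAIM (what is proved, stated in full; the proofs are below) =====
def Claim_equal_param_per_spectra_sorting_fkt : Prop := ∀ (p4fit : List (String × Int)) (number_of_spectra : Int) (number_of_peaks : Int), Dom_param_per_spectra_sorting_fkt p4fit number_of_spectra number_of_peaks → Spec_param_per_spectra_sorting_fkt p4fit number_of_spectra number_of_peaks (param_per_spectra_sorting_fkt p4fit number_of_spectra number_of_peaks)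

-- ===== LEMMAS AND PROOFS =====

/- ---------- decimal representation (enough to know str(n) for n ≥ 0 is digits only) ---------- -/

def pvIsDig (c : Char) : Bool := decide ('0' ≤ c) && decide (c ≤ '9')

def pvRep (n : Nat) : List Char :=
  if n = 0 then ['0'] else ((Nat.digits 10 n).map Nat.digitChar).reverse

def pvValN (ds : List Char) : Nat := ds.foldl (fun v c => v * 10 + (c.toNat - 48)) 0

theorem pvDig_digitChar (d : Nat) (h : d < 10) :
    pvIsDig (Nat.digitChar d) = true ∧ (Nat.digitChar d).toNat = 48 + d := by
  interval_cases d <;> exact ⟨by decide, by decide⟩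

theorem pvRep_lt_ten (n : Nat) (h : n < 10) : pvRep n = [Nat.digitChar n] := by
  rcases Nat.eq_zero_or_pos n with rfl | hp
  · decide
  · rw [pvRep, if_neg (by omega), Nat.digits_def' (by norm_num : (1:Nat) < 10) hp,
      (by omega : n / 10 = 0), Nat.digits_zero, Nat.mod_eq_of_lt h]
    simp

theorem pvRep_succ (n : Nat) (h : 10 ≤ n) :
    pvRep n = pvRep (n / 10) ++ [Nat.digitChar (n % 10)] := by
  rw [pvRep, if_neg (by omega), Nat.digits_def' (by norm_num : (1:Nat) < 10) (by omega),
    pvRep, if_neg (by omega)]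
  simp

theorem pvRep_eq_toDigitsCore (n : Nat) : ∀ (f : Nat) (acc : List Char), n < f →
    Nat.toDigitsCore 10 f n acc = pvRep n ++ acc := by
  induction n using Nat.strong_induction_on with
  | _ n ih =>
    intro f acc hf
    match f with
    | f + 1 =>
      rw [Nat.toDigitsCore.eq_def]
      simp only []
      by_cases h0 : n / 10 = 0
      · rw [if_pos h0, pvRep_lt_ten n (by omega), Nat.mod_eq_of_lt (by omega)]
        simp
      · rw [if_neg h0, ih (n / 10) (by omega) f (_ :: acc) (by omega),
          pvRep_succ n (by omega)]
        simp

theorem pvToChars_eq_pvRep (i : Int) (h : 0 ≤ i) :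
    PySem.Int.toChars i = pvRep i.toNat := by
  rw [PySem.Int.toChars, if_neg (by omega), Nat.toDigits,
    pvRep_eq_toDigitsCore i.toNat (i.toNat + 1) [] (by omega)]
  simp

theorem pvRep_all_dig (n : Nat) : (pvRep n).all pvIsDig = true := by
  rcases Nat.eq_zero_or_pos n with rfl | hp
  · decide
  · rw [pvRep, if_neg (by omega)]
    simp only [List.all_eq_true, List.mem_reverse, List.mem_map]
    rintro c ⟨d, hd, rfl⟩
    exact (pvDig_digitChar d (Nat.digits_lt_base (by norm_num) hd)).1

theorem pvRep_no_underscore (n : Nat) : '_' ∉ pvRep n := by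
  intro hm
  have := (List.all_eq_true.mp (pvRep_all_dig n)) _ hm
  simp [pvIsDig] at this

theorem pvValN_append_singleton (ds : List Char) (c : Char) :
    pvValN (ds ++ [c]) = 10 * pvValN ds + (c.toNat - 48) := by
  simp [pvValN, List.foldl_append, Nat.mul_comm]

theorem pvValN_rep (n : Nat) : pvValN (pvRep n) = n := by
  induction n using Nat.strong_induction_on with
  | _ n ih =>
    by_cases h : n < 10
    · rw [pvRep_lt_ten n h]
      have := (pvDig_digitChar n h).2
      simp [pvValN, this]
    · rw [pvRep_succ n (by omega), pvValN_append_singleton, ih (n / 10) (by omega),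
        (pvDig_digitChar (n % 10) (by omega)).2]
      omega

/- ---------- the outer keys 'spectra_{i}' are distinct ---------- -/

def pvKey (i : Int) : String := "spectra_" ++ PySem.Int.toStr i

theorem pvKey_inj {i i' : Int} (hi : 0 ≤ i) (hi' : 0 ≤ i') (h : pvKey i = pvKey i') : i = i' := by
  have h1 := congrArg String.toList h
  simp only [pvKey, String.toList_append, PySem.Int.toList_toStr] at h1
  have h2 : PySem.Int.toChars i = PySem.Int.toChars i' := List.append_cancel_left h1
  rw [pvToChars_eq_pvRep i hi, pvToChars_eq_pvRep i' hi'] at h2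
  have h3 := congrArg pvValN h2
  rw [pvValN_rep, pvValN_rep] at h3
  omega

theorem pvKeys_nodup (S : Int) : ((PySem.List.pyRange 0 S 1).map pvKey).Nodup := by
  refine List.Nodup.map_on ?_ (PySem.List.nodup_pyRange_one 0 S)
  intro x hx y hy hxy
  rw [PySem.List.mem_pyRange_one] at hx hy
  exact pvKey_inj hx.1 hy.1 hxy

/- ---------- split('_', 2) : a forward spec for PySem.Chars.splitOnMax ---------- -/

def pvSplitF : List Char → List Char → Nat → List (List Char)
  | cur, [], _ => [cur]
  | cur, c :: rest, m =>
    if m = 0 then [cur ++ c :: rest]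
    else if c = '_' then cur :: pvSplitF [] rest (m - 1)
    else pvSplitF (cur ++ [c]) rest m

theorem pvGo_eq : ∀ (fuel : Nat) (l : List Char) (m : Nat) (cur : List Char)
    (acc : List (List Char)), l.length < fuel →
    PySem.Chars.splitOnMax.go ['_'] fuel m l cur acc = acc.reverse ++ pvSplitF cur.reverse l m := by
  intro fuel
  induction fuel with
  | zero => intro l m cur acc h; omega
  | succ fuel ih =>
    intro l m cur acc h
    match l with
    | [] =>
      rw [PySem.Chars.splitOnMax.go, pvSplitF]
      all_goals simp
    | c :: rest =>
      rw [PySem.Chars.splitOnMax.go]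
      by_cases hm : m = 0
      · simp [hm, pvSplitF]
      · by_cases hc : c = '_'
        · subst hc
          have hpre : ['_'].isPrefixOf ('_' :: rest) = true := rfl
          rw [if_neg hm, if_pos hpre]
          have hd : List.drop ['_'].length ('_' :: rest) = rest := rfl
          rw [hd, ih rest (m - 1) [] (cur.reverse :: acc) (by simp at h; omega)]
          rw [pvSplitF, if_neg hm, if_pos rfl]
          simp
        · have hpre : ¬ (['_'].isPrefixOf (c :: rest) = true) := by
            simp [List.isPrefixOf]
            exact fun hcc => hc hcc.symm
          rw [if_neg hm, if_neg hpre]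
          rw [ih rest m (c :: cur) acc (by simp at h; omega)]
          rw [pvSplitF, if_neg hm, if_neg hc]
          simp

theorem pvSplitOnMax_two (l : List Char) :
    PySem.Chars.splitOnMax l ['_'] 2 = pvSplitF [] l 2 := by
  rw [PySem.Chars.splitOnMax, if_neg (by omega)]
  simpa using pvGo_eq (l.length + 1) l 2 [] [] (by omega)

theorem pvSplitF_zero (cur v : List Char) : pvSplitF cur v 0 = [cur ++ v] := by
  cases v with
  | nil => simp [pvSplitF]
  | cons c rest => rw [pvSplitF, if_pos rfl]

theorem pvSplitF_no_sep (u : List Char) (hu : '_' ∉ u) (cur : List Char) (m : Nat) :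
    pvSplitF cur u m = [cur ++ u] := by
  induction u generalizing cur with
  | nil => simp [pvSplitF]
  | cons c rest ih =>
    rw [pvSplitF]
    have hc : ¬ c = '_' := by intro h; exact hu (by simp [h])
    by_cases hm : m = 0
    · rw [if_pos hm]
    · rw [if_neg hm, if_neg hc, ih (fun h => hu (List.mem_cons_of_mem _ h))]
      simp

theorem pvSplitF_sep (u : List Char) (hu : '_' ∉ u) (v cur : List Char) (m : Nat) :
    pvSplitF cur (u ++ '_' :: v) (m + 1) = (cur ++ u) :: pvSplitF [] v m := by
  induction u generalizing cur with
  | nil => simp [pvSplitF]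
  | cons c rest ih =>
    have hc : ¬ c = '_' := by intro h; exact hu (by simp [h])
    rw [List.cons_append, pvSplitF, if_neg (by omega), if_neg hc,
      ih (fun h => hu (List.mem_cons_of_mem _ h))]
    simp

theorem pvUnderscore_decomp (s : List Char) :
    '_' ∉ s ∨ ∃ u v, s = u ++ '_' :: v ∧ '_' ∉ u := by
  induction s with
  | nil => left; simp
  | cons c rest ih =>
    by_cases hc : c = '_'
    · right; exact ⟨[], rest, by simp [hc], by simp⟩
    · rcases ih with h | ⟨u, v, rfl, hu⟩
      · left
        intro hmem
        rcases List.mem_cons.mp hmem with h1 | h1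
        · exact hc h1.symm
        · exact h h1
      · right
        refine ⟨c :: u, v, rfl, ?_⟩
        intro hmem
        rcases List.mem_cons.mp hmem with h1 | h1
        · exact hc h1.symm
        · exact hu h1

theorem pvSplitF_two_inv (s a b c : List Char) (h : pvSplitF [] s 2 = [a, b, c]) :
    s = a ++ '_' :: (b ++ '_' :: c) ∧ '_' ∉ a ∧ '_' ∉ b := by
  rcases pvUnderscore_decomp s with hs | ⟨u, v, rfl, hu⟩
  · rw [pvSplitF_no_sep s hs] at h
    cases h
  · rw [pvSplitF_sep u hu v [] 1] at h
    rcases pvUnderscore_decomp v with hv | ⟨w, r, rfl, hw⟩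
    · rw [pvSplitF_no_sep v hv] at h
      cases h
    · rw [pvSplitF_sep w hw r [] 0, pvSplitF_zero] at h
      simp only [List.nil_append, List.cons.injEq] at h
      obtain ⟨rfl, rfl, rfl, -⟩ := h
      exact ⟨rfl, hu, hw⟩

/- ---------- the tag string determines its two segments ---------- -/

theorem pvSeg_unique : ∀ (u u' : List Char), '_' ∉ u → '_' ∉ u' →
    ∀ (v v' : List Char), u ++ '_' :: v = u' ++ '_' :: v' → u = u' ∧ v = v' := by
  intro u
  induction u with
  | nil =>
    intro u' _ hu' v v' h
    cases u' with
    | nil => simpa using h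
    | cons c t =>
      simp only [List.nil_append, List.cons_append, List.cons.injEq] at h
      exact absurd (h.1 ▸ List.mem_cons_self) hu'
  | cons c t ih =>
    intro u' hu hu' v v' h
    cases u' with
    | nil =>
      simp only [List.cons_append, List.nil_append, List.cons.injEq] at h
      exact absurd (h.1 ▸ List.mem_cons_self) hu
    | cons c' t' =>
      simp only [List.cons_append, List.cons.injEq] at h
      obtain ⟨rfl, h2⟩ := h
      obtain ⟨rfl, rfl⟩ := ih t' (fun hm => hu (List.mem_cons_of_mem _ hm))
        (fun hm => hu' (List.mem_cons_of_mem _ hm)) v v' h2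
      exact ⟨rfl, rfl⟩

def pvPatS (i idx : Int) : String :=
  "p" ++ PySem.Int.toStr i ++ "_" ++ PySem.Int.toStr idx ++ "_"

theorem pvPatS_toList (i idx : Int) :
    (pvPatS i idx).toList = 'p' :: (PySem.Int.toChars i ++ '_' :: (PySem.Int.toChars idx ++ ['_'])) := by
  simp [pvPatS, String.toList_append, PySem.Int.toList_toStr]

theorem pvTag_eq_iff (a b : List Char) (ha : '_' ∉ a) (hb : '_' ∉ b)
    (i idx : Int) (hi : 0 ≤ i) (hx : 0 ≤ idx) :
    ("p" ++ String.ofList a ++ "_" ++ String.ofList b ++ "_") = pvPatS i idx ↔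
      a = PySem.Int.toChars i ∧ b = PySem.Int.toChars idx := by
  have hiu : '_' ∉ PySem.Int.toChars i := by
    rw [pvToChars_eq_pvRep i hi]; exact pvRep_no_underscore _
  have hxu : '_' ∉ PySem.Int.toChars idx := by
    rw [pvToChars_eq_pvRep idx hx]; exact pvRep_no_underscore _
  have hofl_i : String.ofList (PySem.Int.toChars i) = PySem.Int.toStr i := by
    rw [← PySem.Int.toList_toStr]; exact String.ofList_toList
  have hofl_x : String.ofList (PySem.Int.toChars idx) = PySem.Int.toStr idx := by
    rw [← PySem.Int.toList_toStr]; exact String.ofList_toList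
  constructor
  · intro h
    have h1 := congrArg String.toList h
    rw [pvPatS_toList] at h1
    simp only [String.toList_append, String.toList_ofList] at h1
    have h2 : a ++ '_' :: (b ++ ['_']) =
        PySem.Int.toChars i ++ '_' :: (PySem.Int.toChars idx ++ ['_']) := by
      have h3 : 'p' :: (a ++ ('_' :: (b ++ ['_']))) =
          'p' :: (PySem.Int.toChars i ++ '_' :: (PySem.Int.toChars idx ++ ['_'])) := by
        simpa using h1
      simpa using h3
    obtain ⟨ha1, hrest⟩ := pvSeg_unique a (PySem.Int.toChars i) ha hiu _ _ h2
    have hrest' : b ++ '_' :: ([] : List Char) = PySem.Int.toChars idx ++ '_' :: [] := by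
      simpa using hrest
    obtain ⟨hb1, -⟩ := pvSeg_unique b (PySem.Int.toChars idx) hb hxu _ _ hrest'
    exact ⟨ha1, hb1⟩
  · rintro ⟨rfl, rfl⟩
    rw [hofl_i, hofl_x, pvPatS]

/- ---------- membership in the per-name tag set ---------- -/

def pvTagOf (cs : List Char) (jc : Int × Char) : Option String :=
  if jc.2 = 'p' then
    match PySem.Chars.splitOnMax (PySem.List.slice cs (some (jc.1 + 1)) none) ['_'] 2 with
    | [a, b, _] => some ("p" ++ String.ofList a ++ "_" ++ String.ofList b ++ "_")
    | _ => none
  else none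

theorem pvTagsFold_mem (cs : List Char) :
    ∀ (l : List (Int × Char)) (s0 : PySem.Set String) (x : String),
    (x ∈ l.foldl (fun t jc =>
      if jc.2 = 'p' then
        match PySem.Chars.splitOnMax (PySem.List.slice cs (some (jc.1 + 1)) none) ['_'] 2 with
        | [a, b, _] => t.add ("p" ++ String.ofList a ++ "_" ++ String.ofList b ++ "_")
        | _ => t
      else t) s0)
    ↔ x ∈ s0 ∨ ∃ jc ∈ l, pvTagOf cs jc = some x := by
  intro l
  induction l with
  | nil => intro s0 x; simp
  | cons jc t iht =>
    intro s0 x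
    rw [List.foldl_cons, iht]
    have hstep : (x ∈ (if jc.2 = 'p' then
        match PySem.Chars.splitOnMax (PySem.List.slice cs (some (jc.1 + 1)) none) ['_'] 2 with
        | [a, b, _] => s0.add ("p" ++ String.ofList a ++ "_" ++ String.ofList b ++ "_")
        | _ => s0
      else s0)) ↔ (x ∈ s0 ∨ pvTagOf cs jc = some x) := by
      by_cases hp : jc.2 = 'p'
      · rcases hs : PySem.Chars.splitOnMax (PySem.List.slice cs (some (jc.1 + 1)) none) ['_'] 2 with
          _ | ⟨a, _ | ⟨b, _ | ⟨c, _ | _⟩⟩⟩ <;>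
          simp [pvTagOf, hp, hs, PySem.Set.mem_add, eq_comm]
      · simp [pvTagOf, hp]
    rw [hstep, List.exists_mem_cons_iff]
    tauto

theorem pvTags_mem (cs : List Char) (x : String) :
    x ∈ pvTags cs ↔ ∃ jc ∈ PySem.List.enumerate cs, pvTagOf cs jc = some x := by
  rw [pvTags, pvTagsFold_mem]
  have : (x ∈ (PySem.Set.empty : PySem.Set String)) ↔ False := by
    have h : (PySem.Set.empty : PySem.Set String) = [] := rfl
    rw [h]; simp
  rw [this]
  simp

theorem pvTagsFold_nodup (cs : List Char) :
    ∀ (l : List (Int × Char)) (s0 : PySem.Set String), s0.Nodup →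
    (l.foldl (fun t jc =>
      if jc.2 = 'p' then
        match PySem.Chars.splitOnMax (PySem.List.slice cs (some (jc.1 + 1)) none) ['_'] 2 with
        | [a, b, _] => t.add ("p" ++ String.ofList a ++ "_" ++ String.ofList b ++ "_")
        | _ => t
      else t) s0).Nodup := by
  intro l
  induction l with
  | nil => intro s0 h; exact h
  | cons jc t iht =>
    intro s0 h
    rw [List.foldl_cons]
    apply iht
    by_cases hp : jc.2 = 'p'
    · rcases hs : PySem.Chars.splitOnMax (PySem.List.slice cs (some (jc.1 + 1)) none) ['_'] 2 with
        _ | ⟨a, _ | ⟨b, _ | ⟨c, _ | _⟩⟩⟩ <;>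
        simp [hp, h, PySem.Set.nodup_add]
    · simpa [hp] using h

theorem pvTags_nodup (cs : List Char) : (pvTags cs).Nodup :=
  pvTagsFold_nodup cs (PySem.List.enumerate cs) PySem.Set.empty List.nodup_nil

theorem pvSliceDrop (cs : List Char) (k : Nat) :
    PySem.List.slice cs (some ((k : Int) + 1)) none = cs.drop (k + 1) := by
  rw [show ((k : Int) + 1) = ((k + 1 : Nat) : Int) by push_cast; ring]
  exact PySem.List.slice_from_natCast cs (k + 1)

/- ---------- pattern-tag membership ⟺ substring test ---------- -/

theorem pvInfix_iff (cs : List Char) (i idx : Int) :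
    (pvPatS i idx).toList <:+: cs ↔
      ∃ j : Nat, cs[j]? = some 'p' ∧ ∃ r, cs.drop (j + 1) =
        PySem.Int.toChars i ++ '_' :: (PySem.Int.toChars idx ++ '_' :: r) := by
  rw [pvPatS_toList]
  constructor
  · rintro ⟨s, t, rfl⟩
    refine ⟨s.length, ?_, t, ?_⟩
    · rw [List.append_assoc, List.getElem?_append_right (Nat.le_refl _)]
      simp
    · have hre : (s ++ 'p' :: (PySem.Int.toChars i ++ '_' :: (PySem.Int.toChars idx ++ ['_'])) ++ t)
          = (s ++ ['p']) ++ (PySem.Int.toChars i ++ '_' :: (PySem.Int.toChars idx ++ '_' :: t)) := by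
        simp
      rw [hre, List.drop_left' (by simp)]
  · rintro ⟨j, hj, r, hr⟩
    have hjlt : j < cs.length := by
      by_contra hge
      rw [List.getElem?_eq_none (by omega)] at hj
      cases hj
    have hcs : cs = cs.take j ++ 'p' :: cs.drop (j + 1) := by
      conv_lhs => rw [← List.take_append_drop j cs]
      congr 1
      rw [List.drop_eq_getElem_cons hjlt]
      simp only [List.getElem?_eq_getElem hjlt, Option.some.injEq] at hj
      rw [hj]
    refine ⟨cs.take j, r, ?_⟩
    conv_rhs => rw [hcs, hr]
    simp

theorem pvPat_mem_tags_iff (name : String) (i idx : Int) (hi : 0 ≤ i) (hx : 0 ≤ idx) :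
    pvPatS i idx ∈ pvTags name.toList ↔ PySem.Str.isIn (pvPatS i idx) name = true := by
  rw [PySem.Str.isIn_iff_infix, pvInfix_iff name.toList i idx, pvTags_mem]
  constructor
  · rintro ⟨jc, hjc, htag⟩
    obtain ⟨k, hk, rfl⟩ := (PySem.List.mem_enumerate_iff name.toList 0 jc).mp hjc
    unfold pvTagOf at htag
    by_cases hp : (((0 : Int) + (k : Int), name.toList[k]).2 = 'p')
    swap
    · rw [if_neg hp] at htag; cases htag
    rw [if_pos hp] at htag
    have hsl : PySem.List.slice name.toList
        (some (((0 : Int) + (k : Int), name.toList[k]).1 + 1)) none = name.toList.drop (k + 1) := by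
      show PySem.List.slice name.toList (some ((0 : Int) + (k : Int) + 1)) none = _
      rw [show ((0 : Int) + (k : Int) + 1) = ((k : Int) + 1) by ring]
      exact pvSliceDrop name.toList k
    rw [hsl, pvSplitOnMax_two] at htag
    rcases hsp : pvSplitF [] (name.toList.drop (k + 1)) 2 with
      _ | ⟨a, _ | ⟨b, _ | ⟨c, _ | _⟩⟩⟩ <;> rw [hsp] at htag <;> try cases htag
    have htag' : ("p" ++ String.ofList a ++ "_" ++ String.ofList b ++ "_") = pvPatS i idx := by
      injection htag
    obtain ⟨hform, ha, hb⟩ := pvSplitF_two_inv _ a b c hsp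
    obtain ⟨rfl, rfl⟩ := (pvTag_eq_iff a b ha hb i idx hi hx).mp htag'
    refine ⟨k, ?_, c, by simpa using hform⟩
    rw [List.getElem?_eq_getElem hk]
    simpa using hp
  · rintro ⟨j, hj, r, hr⟩
    have hjlt : j < name.toList.length := by
      by_contra hge
      rw [List.getElem?_eq_none (by omega)] at hj
      cases hj
    refine ⟨((0 : Int) + (j : Int), name.toList[j]),
      (PySem.List.mem_enumerate_iff name.toList 0 _).mpr ⟨j, hjlt, rfl⟩, ?_⟩
    unfold pvTagOf
    have hc : name.toList[j] = 'p' := by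
      rw [List.getElem?_eq_getElem hjlt] at hj
      injection hj
    rw [if_pos (by simpa using hc)]
    have hsl : PySem.List.slice name.toList
        (some (((0 : Int) + (j : Int), name.toList[j]).1 + 1)) none = name.toList.drop (j + 1) := by
      show PySem.List.slice name.toList (some ((0 : Int) + (j : Int) + 1)) none = _
      rw [show ((0 : Int) + (j : Int) + 1) = ((j : Int) + 1) by ring]
      exact pvSliceDrop name.toList j
    have hiu : '_' ∉ PySem.Int.toChars i := by
      rw [pvToChars_eq_pvRep i hi]; exact pvRep_no_underscore _
    have hxu : '_' ∉ PySem.Int.toChars idx := by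
      rw [pvToChars_eq_pvRep idx hx]; exact pvRep_no_underscore _
    rw [hsl, pvSplitOnMax_two, hr, pvSplitF_sep _ hiu _ [] 1,
      pvSplitF_sep _ hxu _ [] 0, pvSplitF_zero]
    simp only [List.nil_append]
    exact congrArg some ((pvTag_eq_iff _ _ hiu hxu i idx hi hx).mpr ⟨rfl, rfl⟩)

/- ---------- shared normal form ---------- -/

def pvMatches (p4fit : List (String × Int)) (P : Int) (i : Int) : List (String × Int) :=
  (PySem.List.pyRange 0 P 1).flatMap (fun idx =>
    p4fit.filter (fun nv => PySem.Str.isIn (pvPatS i idx) nv.1))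

def pvDictOf (l : List (String × Int)) : PySem.Dict String Int :=
  l.foldl (fun d nv => d.insert nv.1 nv.2) PySem.Dict.empty

def pvNormal (p4fit : List (String × Int)) (S P : Int) : List (String × List (String × Int)) :=
  (PySem.List.pyRange 0 S 1).map (fun i => (pvKey i, (pvDictOf (pvMatches p4fit P i)).items))

/- ---------- A reduces to the normal form ---------- -/

def pvMapform (S : Int) (g : Int → PySem.Dict String Int) : List (String × PySem.Dict String Int) :=
  (PySem.List.pyRange 0 S 1).map (fun x => (pvKey x, g x))

theorem pvMapform_congr (S : Int) (g1 g2 : Int → PySem.Dict String Int)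
    (h : ∀ x, 0 ≤ x → x < S → g1 x = g2 x) : pvMapform S g1 = pvMapform S g2 := by
  unfold pvMapform
  apply List.map_congr_left
  intro x hx
  rw [PySem.List.mem_pyRange_one] at hx
  rw [h x hx.1 hx.2]

theorem pvStage1 (S : Int) :
    ((PySem.List.pyRange 0 S 1).foldl (fun d i => d.insert (pvKey i) PySem.Dict.empty)
      (PySem.Dict.empty : PySem.Dict String (PySem.Dict String Int))).items
      = pvMapform S (fun _ => PySem.Dict.empty) := by
  have h := PySem.Dict.items_foldl_insert_fresh (PySem.List.pyRange 0 S 1) pvKey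
    (fun _ => (PySem.Dict.empty : PySem.Dict String Int)) PySem.Dict.empty
    (fun a _ => by simp [PySem.Dict.contains_empty]) (pvKeys_nodup S)
  simpa [pvMapform] using h

theorem pvItems_modify (S : Int) (g : Int → PySem.Dict String Int)
    (d : PySem.Dict String (PySem.Dict String Int)) (hd : d.items = pvMapform S g)
    (i : Int) (hi : 0 ≤ i) (hiS : i < S) (f : PySem.Dict String Int → PySem.Dict String Int) :
    (d.modify (pvKey i) PySem.Dict.empty f).items
      = pvMapform S (fun x => if x = i then f (g x) else g x) := by
  have hkeys : d.keys = (PySem.List.pyRange 0 S 1).map pvKey := by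
    have h0 : d.keys = d.items.map (fun p => p.1) := rfl
    rw [h0, hd, pvMapform, List.map_map]
    rfl
  have hnodup : d.keys.Nodup := by rw [hkeys]; exact pvKeys_nodup S
  have hmem : (pvKey i, g i) ∈ d.items := by
    rw [hd, pvMapform]
    exact List.mem_map.mpr ⟨i, PySem.List.mem_pyRange_one.mpr ⟨hi, hiS⟩, rfl⟩
  have hget : d.get? (pvKey i) = some (g i) := PySem.Dict.get?_of_mem_items d hmem hnodup
  have hcont : d.contains (pvKey i) = true := by
    rw [PySem.Dict.contains_iff_mem_keys, hkeys]
    exact List.mem_map.mpr ⟨i, PySem.List.mem_pyRange_one.mpr ⟨hi, hiS⟩, rfl⟩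
  have hmod : d.modify (pvKey i) PySem.Dict.empty f
      = d.insert (pvKey i) (f (d.getD (pvKey i) PySem.Dict.empty)) := rfl
  rw [hmod, PySem.Dict.getD_of_get?_eq_some d _ hget,
    PySem.Dict.items_insert_of_contains d _ hcont, hd, pvMapform, pvMapform, List.map_map]
  apply List.map_congr_left
  intro x hx
  rw [PySem.List.mem_pyRange_one] at hx
  by_cases hxi : x = i
  · subst hxi; simp
  · simp [hxi]
    intro hk
    exact absurd (pvKey_inj hx.1 hi hk) hxi

set_option maxHeartbeats 1000000 in
theorem pvFoldNames (S i : Int) (hi : 0 ≤ i) (hiS : i < S) (idx : Int) :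
    ∀ (l : List (String × Int)) (g : Int → PySem.Dict String Int)
      (d : PySem.Dict String (PySem.Dict String Int)), d.items = pvMapform S g →
    (l.foldl (fun d nv =>
      if PySem.Str.isIn (pvPatS i idx) nv.1 then
        d.modify (pvKey i) PySem.Dict.empty (fun inner => inner.insert nv.1 nv.2)
      else d) d).items
    = pvMapform S (fun x => if x = i then
        (l.filter (fun nv => PySem.Str.isIn (pvPatS i idx) nv.1)).foldl
          (fun inner nv => inner.insert nv.1 nv.2) (g x)
      else g x) := by
  intro l
  induction l with
  | nil =>
    intro g d hd
    simp only [List.foldl_nil, List.filter_nil, hd]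
    apply pvMapform_congr
    intro x _ _
    by_cases hxi : x = i <;> simp [hxi]
  | cons nv t iht =>
    intro g d hd
    by_cases hm : PySem.Str.isIn (pvPatS i idx) nv.1 = true
    · simp only [List.foldl_cons, if_pos hm]
      rw [iht _ _ (pvItems_modify S g d hd i hi hiS (fun inner => inner.insert nv.1 nv.2))]
      apply pvMapform_congr
      intro x _ _
      by_cases hxi : x = i
      · simp only [if_pos hxi]
        subst hxi
        have hfil : List.filter (fun nv => PySem.Str.isIn (pvPatS x idx) nv.1) (nv :: t)
            = nv :: List.filter (fun nv => PySem.Str.isIn (pvPatS x idx) nv.1) t :=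
          List.filter_cons_of_pos hm
        rw [hfil, List.foldl_cons]
      · simp [hxi]
    · rw [List.foldl_cons, if_neg hm]
      have hfilter : List.filter (fun nv => PySem.Str.isIn (pvPatS i idx) nv.1) (nv :: t)
          = List.filter (fun nv => PySem.Str.isIn (pvPatS i idx) nv.1) t :=
        List.filter_cons_of_neg (by simpa using hm)
      rw [iht g d hd]
      apply pvMapform_congr
      intro x _ _
      rw [hfilter]

theorem pvFoldSpectra (S idx : Int) (p4fit : List (String × Int)) :
    ∀ (li : List Int), li.Nodup → (∀ i ∈ li, 0 ≤ i ∧ i < S) →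
    ∀ (g : Int → PySem.Dict String Int) (d : PySem.Dict String (PySem.Dict String Int)),
      d.items = pvMapform S g →
    (li.foldl (fun d i => p4fit.foldl (fun d nv =>
        if PySem.Str.isIn (pvPatS i idx) nv.1 then
          d.modify (pvKey i) PySem.Dict.empty (fun inner => inner.insert nv.1 nv.2)
        else d) d) d).items
    = pvMapform S (fun x => if x ∈ li then
        (p4fit.filter (fun nv => PySem.Str.isIn (pvPatS x idx) nv.1)).foldl
          (fun inner nv => inner.insert nv.1 nv.2) (g x)
      else g x) := by
  intro li
  induction li with
  | nil =>
    intro _ _ g d hd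
    simp only [List.foldl_nil, hd]
    apply pvMapform_congr
    intro x _ _
    simp
  | cons i t iht =>
    intro hnd hbound g d hd
    have hi := hbound i List.mem_cons_self
    simp only [List.foldl_cons]
    rw [iht (List.Nodup.of_cons hnd) (fun j hj => hbound j (List.mem_cons_of_mem _ hj)) _ _
      (pvFoldNames S i hi.1 hi.2 idx p4fit g d hd)]
    apply pvMapform_congr
    intro x _ _
    by_cases hxt : x ∈ t
    · have hxi : x ≠ i := by
        intro he
        subst he
        exact (List.nodup_cons.mp hnd).1 hxt
      simp [hxt, hxi, List.mem_cons]
    · by_cases hxi : x = i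
      · subst hxi
        simp [hxt, List.mem_cons]
      · simp [hxt, hxi, List.mem_cons]

theorem pvFoldIdx (S : Int) (p4fit : List (String × Int)) :
    ∀ (lidx : List Int) (g : Int → PySem.Dict String Int)
      (d : PySem.Dict String (PySem.Dict String Int)), d.items = pvMapform S g →
    (lidx.foldl (fun d idx =>
      (PySem.List.pyRange 0 S 1).foldl (fun d i => p4fit.foldl (fun d nv =>
        if PySem.Str.isIn (pvPatS i idx) nv.1 then
          d.modify (pvKey i) PySem.Dict.empty (fun inner => inner.insert nv.1 nv.2)
        else d) d) d) d).items
    = pvMapform S (fun x =>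
        (lidx.flatMap (fun idx =>
          p4fit.filter (fun nv => PySem.Str.isIn (pvPatS x idx) nv.1))).foldl
          (fun inner nv => inner.insert nv.1 nv.2) (g x)) := by
  intro lidx
  induction lidx with
  | nil =>
    intro g d hd
    simp only [List.foldl_nil, hd]
    apply pvMapform_congr
    intro x _ _
    simp
  | cons idx t iht =>
    intro g d hd
    simp only [List.foldl_cons]
    rw [iht _ _ (pvFoldSpectra S idx p4fit (PySem.List.pyRange 0 S 1)
      (PySem.List.nodup_pyRange_one 0 S)
      (fun j hj => PySem.List.mem_pyRange_one.mp hj) g d hd)]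
    apply pvMapform_congr
    intro x hx0 hxS
    have hxmem : x ∈ PySem.List.pyRange 0 S 1 := PySem.List.mem_pyRange_one.mpr ⟨hx0, hxS⟩
    rw [List.flatMap_cons, List.foldl_append]
    simp [hxmem]

theorem pvA_eq_normal (p4fit : List (String × Int)) (S P : Int) :
    param_per_spectra_sorting_fkt p4fit S P = pvNormal p4fit S P := by
  have hA : param_per_spectra_sorting_fkt p4fit S P
      = ((PySem.List.pyRange 0 P 1).foldl (fun d idx =>
          (PySem.List.pyRange 0 S 1).foldl (fun d i => p4fit.foldl (fun d nv =>
            if PySem.Str.isIn (pvPatS i idx) nv.1 then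
              d.modify (pvKey i) PySem.Dict.empty (fun inner => inner.insert nv.1 nv.2)
            else d) d) d)
          ((PySem.List.pyRange 0 S 1).foldl (fun d i => d.insert (pvKey i) PySem.Dict.empty)
            PySem.Dict.empty)).items.map (fun p => (p.1, p.2.items)) := rfl
  rw [hA, pvFoldIdx S p4fit (PySem.List.pyRange 0 P 1) _ _ (pvStage1 S), pvNormal,
    pvMapform, List.map_map]
  apply List.map_congr_left
  intro x _
  simp only [Function.comp_apply]
  rfl

/- ---------- B reduces to the normal form ---------- -/

def pvOcc (p4fit : List (String × Int)) : PySem.Dict String (List (String × Int)) :=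
  p4fit.foldl (fun occ nv =>
    (pvTags nv.1.toList).foldl
      (fun occ tag => occ.modify tag [] (fun l => l ++ [(nv.1, nv.2)])) occ) PySem.Dict.empty

theorem pvOccStep (name : String) (val : Int) (k : String) :
    ∀ (ts : List String) (g : PySem.Dict String (List (String × Int))),
    (ts.foldl (fun g tag => g.modify tag [] (fun l => l ++ [(name, val)])) g).getD k []
      = g.getD k [] ++ (ts.filter (fun t => t == k)).map (fun _ => (name, val)) := by
  intro ts
  induction ts with
  | nil => intro g; simp
  | cons tag t iht =>
    intro g
    rw [List.foldl_cons, iht]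
    have hmod : g.modify tag [] (fun l => l ++ [(name, val)])
        = g.insert tag (g.getD tag [] ++ [(name, val)]) := rfl
    rw [hmod, PySem.Dict.getD_insert]
    by_cases hab : tag = k
    · rw [List.filter_cons_of_pos (by simpa using hab), if_pos hab.symm]
      simp [hab]
    · rw [List.filter_cons_of_neg (by simpa using hab), if_neg (fun h => hab h.symm)]

theorem pvFilter_eq_of_nodup (ts : List String) (hnd : ts.Nodup) (k : String) :
    ts.filter (fun t => t == k) = if k ∈ ts then [k] else [] := by
  induction ts with
  | nil => simp
  | cons tag t iht =>
    have hnd' := List.nodup_cons.mp hnd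
    by_cases htk : tag = k
    · subst htk
      rw [List.filter_cons_of_pos (by simp), iht hnd'.2, if_neg hnd'.1, if_pos List.mem_cons_self]
    · rw [List.filter_cons_of_neg (by simpa using htk), iht hnd'.2]
      by_cases hk : k ∈ t
      · rw [if_pos hk, if_pos (List.mem_cons_of_mem _ hk)]
      · rw [if_neg hk, if_neg (by
          simp only [List.mem_cons, not_or]
          exact ⟨fun h => htk h.symm, hk⟩)]

theorem pvOcc_getD (p4fit : List (String × Int)) (k : String) :
    (pvOcc p4fit).getD k []
      = p4fit.flatMap (fun nv => if k ∈ pvTags nv.1.toList then [(nv.1, nv.2)] else []) := by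
  rw [pvOcc]
  have haux : ∀ (l : List (String × Int)) (g : PySem.Dict String (List (String × Int))),
      (l.foldl (fun occ nv =>
        (pvTags nv.1.toList).foldl
          (fun occ tag => occ.modify tag [] (fun l => l ++ [(nv.1, nv.2)])) occ) g).getD k []
      = g.getD k [] ++ l.flatMap (fun nv => if k ∈ pvTags nv.1.toList then [(nv.1, nv.2)] else []) := by
    intro l
    induction l with
    | nil => intro g; simp
    | cons nv t iht =>
      intro g
      rw [List.foldl_cons, iht, pvOccStep nv.1 nv.2 k (pvTags nv.1.toList) g,
        pvFilter_eq_of_nodup _ (pvTags_nodup nv.1.toList) k, List.flatMap_cons, List.append_assoc]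
      congr 2
      by_cases hk : k ∈ pvTags nv.1.toList <;> simp [hk]
  rw [haux, PySem.Dict.getD_empty]
  rfl

theorem pvBucket_eq_filter (p4fit : List (String × Int)) (i idx : Int)
    (hi : 0 ≤ i) (hx : 0 ≤ idx) :
    (pvOcc p4fit).getD (pvPatS i idx) []
      = p4fit.filter (fun nv => PySem.Str.isIn (pvPatS i idx) nv.1) := by
  rw [pvOcc_getD]
  induction p4fit with
  | nil => simp
  | cons nv t iht =>
    rw [List.flatMap_cons, iht]
    by_cases hm : PySem.Str.isIn (pvPatS i idx) nv.1 = true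
    · rw [if_pos ((pvPat_mem_tags_iff nv.1 i idx hi hx).mpr hm)]
      simp only [List.filter_cons, hm, if_true, List.singleton_append]
    · rw [if_neg (fun h => hm ((pvPat_mem_tags_iff nv.1 i idx hi hx).mp h))]
      have hm' : PySem.Str.isIn (pvPatS i idx) nv.1 = false := by
        cases hb : PySem.Str.isIn (pvPatS i idx) nv.1
        · rfl
        · exact absurd hb hm
      simp only [List.filter_cons, hm', Bool.false_eq_true, if_false, List.nil_append]

theorem pvFoldl_flatMap {α β γ : Type} (l : List α) (g : α → List β)
    (f : γ → β → γ) (init : γ) :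
    l.foldl (fun a x => (g x).foldl f a) init = (l.flatMap g).foldl f init := by
  induction l generalizing init with
  | nil => rfl
  | cons x t iht => rw [List.foldl_cons, List.flatMap_cons, List.foldl_append, iht]

theorem pvB_eq_normal (p4fit : List (String × Int)) (S P : Int) :
    param_per_spectra_sorting_fkt_alt p4fit S P = pvNormal p4fit S P := by
  have hB : param_per_spectra_sorting_fkt_alt p4fit S P
      = ((PySem.List.pyRange 0 S 1).foldl (fun res i =>
          res.insert (pvKey i)
            ((PySem.List.pyRange 0 P 1).foldl (fun m idx =>
              ((pvOcc p4fit).getD (pvPatS i idx) []).foldl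
                (fun m nv => m.insert nv.1 nv.2) m) PySem.Dict.empty))
          PySem.Dict.empty).items.map (fun p => (p.1, p.2.items)) := rfl
  rw [hB]
  have hfresh := PySem.Dict.items_foldl_insert_fresh (PySem.List.pyRange 0 S 1) pvKey
    (fun i => (PySem.List.pyRange 0 P 1).foldl (fun m idx =>
      ((pvOcc p4fit).getD (pvPatS i idx) []).foldl
        (fun m nv => m.insert nv.1 nv.2) m) PySem.Dict.empty)
    PySem.Dict.empty
    (fun a _ => by simp [PySem.Dict.contains_empty]) (pvKeys_nodup S)
  rw [hfresh]
  have hemp : (PySem.Dict.empty : PySem.Dict String (PySem.Dict String Int)).items = [] := rfl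
  simp only [hemp, List.nil_append, List.map_map, pvNormal]
  apply List.map_congr_left
  intro i hi
  rw [PySem.List.mem_pyRange_one] at hi
  simp only [Function.comp_apply]
  congr 1
  have hmerged : (PySem.List.pyRange 0 P 1).foldl (fun m idx =>
      ((pvOcc p4fit).getD (pvPatS i idx) []).foldl
        (fun m nv => m.insert nv.1 nv.2) m) PySem.Dict.empty
      = pvDictOf (pvMatches p4fit P i) := by
    rw [pvDictOf, pvMatches, ← pvFoldl_flatMap]
    apply PySem.List.foldl_congr_mem
    intro acc idx hidx
    rw [PySem.List.mem_pyRange_one] at hidx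
    rw [pvBucket_eq_filter p4fit i idx hi.1 hidx.1]
  rw [hmerged]

-- ===== VERDICT (by name: the statement is the Claim_ definition above) =====
theorem param_per_spectra_sorting_fkt_spec : Claim_equal_param_per_spectra_sorting_fkt := by
  intro p4fit S P _
  unfold Spec_param_per_spectra_sorting_fkt
  rw [pvA_eq_normal, pvB_eq_normal]
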